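-- pv_equiv track=rewrite | github.com/TheVice/WinUpdatesManager | WinUpdatesManager/core/updates.py | getKB
-- ===== SOURCE A (Python) =====
-- def getKB(aPath):
--
--     length = len(aPath)
--     startKB = aPath.find('KB')
--
--     if startKB != -1 and startKB + 2 < length:
--         startKB += 2
--         endKB = startKB
--
--         while endKB < length and aPath[endKB].isdigit():
--             endKB += 1
--
--         if endKB - startKB > 0:
--             return int(aPath[startKB:endKB])
--
--     return -1
-- ===== SOURCE B (Python) =====
-- def getKB(aPath):
--     _, sep, rest = aPath.partition('KB')
--     if not sep or not rest or not rest[0].isdigit():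
--         return -1
--     n = 0
--     for ch in rest:
--         if not ch.isdigit():
--             break
--         n = n * 10 + (ord(ch) - 48)
--     return n
-- ===== Notes on version B (the rewrite author's own statement) =====
-- stated objective: idiomatic
-- what changed: Replaces the find + index-arithmetic digit scan + slice + int() with str.partition on 'KB' and a single Horner-style pass that accumulates the number digit by digit, never slicing or re-parsing.
import Mathlib
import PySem

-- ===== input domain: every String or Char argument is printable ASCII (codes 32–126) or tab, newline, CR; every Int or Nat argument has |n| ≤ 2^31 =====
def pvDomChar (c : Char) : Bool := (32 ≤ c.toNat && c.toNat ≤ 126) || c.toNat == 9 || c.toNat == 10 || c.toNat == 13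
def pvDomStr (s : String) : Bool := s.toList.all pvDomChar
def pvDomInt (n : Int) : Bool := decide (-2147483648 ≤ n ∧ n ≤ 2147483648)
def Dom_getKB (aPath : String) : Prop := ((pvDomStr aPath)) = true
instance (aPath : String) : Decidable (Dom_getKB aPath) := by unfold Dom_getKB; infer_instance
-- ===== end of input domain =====

-- B: str.partition('KB') plus one Horner-style digit pass instead of find + index scan + slice + int(); idiomatic, same cost.

-- ===== PORT A =====
-- the while loop: number of leading digit positions from endKB (= endKB - startKB at exit)
def pvScanDigits : List Char → Nat
  | [] => 0
  | c :: cs => if PySem.Chars.isdigit c then pvScanDigits cs + 1 else 0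

-- int(aPath[startKB:endKB]): exact here because the slice is a nonempty run of ASCII
-- digits '0'..'9' (PySem.Chars.isdigit accepts exactly those), where int() is plain decimal
def pvDecVal (ds : List Char) : Int :=
  ds.foldl (fun n c => n * 10 + ((c.toNat : Int) - 48)) 0

def getKB (aPath : String) : Int :=
  let cs := aPath.toList
  let length : Int := PySem.List.len cs
  let startKB := PySem.Chars.find cs ['K', 'B']
  if startKB ≠ -1 ∧ startKB + 2 < length then
    let s := startKB + 2
    let k := pvScanDigits (cs.drop s.toNat)
    if 0 < k then pvDecVal (PySem.List.slice cs (some s) (some (s + (k : Int)))) else -1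
  else -1

-- ===== PORT B =====
-- hand port of aPath.partition('KB') restricted to what B uses: the remainder after the
-- FIRST occurrence of 'KB' (none when 'KB' does not occur); exact
def pvFindKBRest : List Char → Option (List Char)
  | [] => none
  | c :: cs => if c = 'K' ∧ cs.head? = some 'B' then some cs.tail else pvFindKBRest cs

-- B's for-loop with break: Horner accumulation over the leading digits
def pvHorner : List Char → Int → Int
  | [], n => n
  | c :: cs, n => if PySem.Chars.isdigit c then pvHorner cs (n * 10 + ((c.toNat : Int) - 48)) else n

def getKB_alt (aPath : String) : Int :=
  match pvFindKBRest aPath.toList with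
  | none => -1
  | some rest =>
    match rest with
    | [] => -1
    | d :: _ => if PySem.Chars.isdigit d then pvHorner rest 0 else -1

-- ===== PRECONDITION & SPEC =====
def Spec_getKB (aPath : String) (out : Int) : Prop := out = getKB_alt aPath
instance (aPath : String) (out : Int) : Decidable (Spec_getKB aPath out) := by unfold Spec_getKB; infer_instance

-- ===== CLAIM (what is proved, stated in full; the proofs are below) =====
def Claim_equal_getKB : Prop := ∀ (aPath : String), Dom_getKB aPath → Spec_getKB aPath (getKB aPath)

-- ===== LEMMAS AND PROOFS =====

-- ['K','B'] is a prefix of c :: cs iff c = 'K' and cs starts with 'B'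
theorem pvKB_prefix_cons (c : Char) (cs : List Char) :
    ['K', 'B'] <+: c :: cs ↔ (c = 'K' ∧ cs.head? = some 'B') := by
  cases cs with
  | nil =>
    simp [List.cons_prefix_cons]
  | cons d tl =>
    simp [List.cons_prefix_cons, eq_comm]

theorem pvFindKBRest_none (cs : List Char) (h : pvFindKBRest cs = none) :
    ¬ ['K', 'B'] <:+: cs := by
  induction cs with
  | nil => simp
  | cons c cs ih =>
    rw [pvFindKBRest] at h
    split at h
    · exact absurd h (by simp)
    · rename_i hcond
      intro hinf
      rcases List.infix_cons_iff.mp hinf with hpre | hinf'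
      · exact hcond ((pvKB_prefix_cons c cs).mp hpre)
      · exact ih h hinf'

theorem pvFindKBRest_some (cs rest : List Char) (h : pvFindKBRest cs = some rest) :
    ∃ pre : List Char, cs = pre ++ 'K' :: 'B' :: rest ∧
      ∀ j < pre.length, ¬ ['K', 'B'] <+: cs.drop j := by
  induction cs generalizing rest with
  | nil => simp [pvFindKBRest] at h
  | cons c cs ih =>
    rw [pvFindKBRest] at h
    split at h
    · rename_i hcond
      obtain ⟨hc, hhd⟩ := hcond
      cases cs with
      | nil => simp at hhd
      | cons d tl =>
        simp at hhd
        simp at h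
        refine ⟨[], by simp [hc, hhd, h], by simp⟩
    · rename_i hcond
      obtain ⟨pre, hpre, hmin⟩ := ih rest h
      refine ⟨c :: pre, by simp [hpre], ?_⟩
      intro j hj
      cases j with
      | zero =>
        simp only [List.drop_zero]
        intro hp
        exact hcond ((pvKB_prefix_cons c cs).mp hp)
      | succ j =>
        simp only [List.length_cons] at hj
        simpa using hmin j (by omega)

-- find points at pre.length when cs = pre ++ 'K' :: 'B' :: rest with no earlier match
theorem pvFind_eq (cs pre rest : List Char)
    (hcs : cs = pre ++ 'K' :: 'B' :: rest)
    (hmin : ∀ j < pre.length, ¬ ['K', 'B'] <+: cs.drop j) :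
    PySem.Chars.find cs ['K', 'B'] = (pre.length : Int) := by
  have hinf : ['K', 'B'] <:+: cs := ⟨pre, rest, by simp [hcs]⟩
  have hnn : 0 ≤ PySem.Chars.find cs ['K', 'B'] := (PySem.Chars.find_nonneg_iff _ _).mpr hinf
  obtain ⟨hp, hm⟩ := PySem.Chars.find_spec hnn
  have hpreKB : ['K', 'B'] <+: cs.drop pre.length := by
    rw [hcs, List.drop_left]
    exact ⟨rest, rfl⟩
  have h1 : ¬ (PySem.Chars.find cs ['K', 'B']).toNat < pre.length := fun hlt =>
    hmin _ hlt hp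
  have h2 : ¬ pre.length < (PySem.Chars.find cs ['K', 'B']).toNat := fun hlt =>
    hm _ hlt hpreKB
  omega

theorem pvHorner_eq (rest : List Char) (n : Int) :
    pvHorner rest n =
      (rest.take (pvScanDigits rest)).foldl (fun n c => n * 10 + ((c.toNat : Int) - 48)) n := by
  induction rest generalizing n with
  | nil => simp [pvHorner, pvScanDigits]
  | cons c cs ih =>
    rw [pvHorner, pvScanDigits]
    by_cases hd : PySem.Chars.isdigit c = true
    · simp [hd, ih]
    · simp [hd]

-- ===== VERDICT (by name: the statement is the Claim_ definition above) =====
theorem getKB_spec : Claim_equal_getKB := by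
  intro aPath _
  unfold Spec_getKB getKB getKB_alt
  simp only [PySem.List.len_eq]
  cases hfind : pvFindKBRest aPath.toList with
  | none =>
    have hni := pvFindKBRest_none _ hfind
    have : PySem.Chars.find aPath.toList ['K', 'B'] = -1 :=
      (PySem.Chars.find_eq_neg_one_iff _ _).mpr hni
    simp [this]
  | some rest =>
    obtain ⟨pre, hcs, hmin⟩ := pvFindKBRest_some _ _ hfind
    have hf := pvFind_eq _ _ _ hcs hmin
    rw [hf]
    have hlen : aPath.toList.length = pre.length + 2 + rest.length := by
      simp [hcs]; omega
    cases rest with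
    | nil =>
      have : ¬ ((pre.length : Int) ≠ -1 ∧ (pre.length : Int) + 2 < (aPath.toList.length : Int)) := by
        simp only [hlen, List.length_nil]; push_cast; omega
      rw [if_neg this]
    | cons d tl =>
      have hcond : ((pre.length : Int) ≠ -1 ∧ (pre.length : Int) + 2 < (aPath.toList.length : Int)) := by
        simp only [hlen, List.length_cons]; push_cast; omega
      rw [if_pos hcond]
      have hdrop : aPath.toList.drop ((pre.length : Int) + 2).toNat = d :: tl := by
        have h2 : ((pre.length : Int) + 2).toNat = pre.length + 2 := by omega
        rw [h2, hcs, show pre ++ 'K' :: 'B' :: d :: tl = (pre ++ ['K', 'B']) ++ d :: tl by simp,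
          show pre.length + 2 = (pre ++ ['K', 'B']).length by simp]
        exact List.drop_left
      rw [hdrop]
      by_cases hd : PySem.Chars.isdigit d = true
      · have hk : 0 < pvScanDigits (d :: tl) := by rw [pvScanDigits]; simp [hd]
        rw [if_pos hk]
        show _ = if PySem.Chars.isdigit d = true then pvHorner (d :: tl) 0 else -1
        rw [if_pos hd]
        have hslice : PySem.List.slice aPath.toList (some ((pre.length : Int) + 2))
            (some ((pre.length : Int) + 2 + (pvScanDigits (d :: tl) : Int)))
            = (aPath.toList.drop (pre.length + 2)).take (pvScanDigits (d :: tl)) := by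
          rw [show ((pre.length : Int) + 2) = ((pre.length + 2 : Nat) : Int) by push_cast; ring]
          exact PySem.List.slice_natCast_add _ _ _
        rw [hslice]
        have hdrop' : aPath.toList.drop (pre.length + 2) = d :: tl := by
          have := hdrop
          rwa [show ((pre.length : Int) + 2).toNat = pre.length + 2 by omega] at this
        rw [hdrop', pvDecVal, pvHorner_eq]
      · have hk : pvScanDigits (d :: tl) = 0 := by rw [pvScanDigits]; simp [hd]
        simp [hk, hd]
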